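-- pv_equiv track=rewrite | github.com/SauravSinha76/scaler | class10/max_size_non_negetive_sub_array.py | solve
-- ===== SOURCE A (Python) =====
-- def solve(A):
--     n = len(A)
--     ans =0
--     start =0
--     end =0
--     max_i = -1
--     max_j =-1
--     for i in range(n):
--         if A[i] < 0:
--             start = i+1
--         else:
--             end = i+1
--             if ans < (end - start):
--                 ans = (end - start)
--                 max_i = start
--                 max_j = end
--
--
--     return A[max_i:max_j]
-- ===== SOURCE B (Python) =====
-- def solve(A):
--     # Phase 1: split A into the maximal runs of consecutive non-negative elements.
--     segs = []
--     cur = []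
--     for x in A:
--         if x >= 0:
--             cur.append(x)
--         else:
--             if cur:
--                 segs.append(cur)
--             cur = []
--     if cur:
--         segs.append(cur)
--     # Phase 2: select the first longest run (empty list if there is none).
--     best = []
--     for s in segs:
--         if len(best) < len(s):
--             best = s
--     return best
-- ===== Notes on version B (the rewrite author's own statement) =====
-- stated objective: idiomatic
-- what changed: Replaces A's fused index/window tracking (five integer state variables plus a final slice) by a two-phase decomposition: first split the list into maximal non-negative runs, then select the first longest run.
import Mathlib
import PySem

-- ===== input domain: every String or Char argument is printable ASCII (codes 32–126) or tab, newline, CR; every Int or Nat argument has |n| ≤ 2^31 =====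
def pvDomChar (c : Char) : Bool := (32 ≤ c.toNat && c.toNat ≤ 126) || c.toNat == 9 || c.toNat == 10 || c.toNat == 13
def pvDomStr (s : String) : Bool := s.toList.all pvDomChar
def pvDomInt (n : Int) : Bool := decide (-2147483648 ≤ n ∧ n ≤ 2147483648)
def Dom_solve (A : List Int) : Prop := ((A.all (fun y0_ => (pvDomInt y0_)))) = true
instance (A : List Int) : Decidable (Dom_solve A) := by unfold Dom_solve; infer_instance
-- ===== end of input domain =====

-- B replaces A's fused window tracking by a two-phase "split into non-negative runs, then pick the first longest" decomposition (same cost).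

-- ===== PORT A =====
-- state = (ans, start, end, max_i, max_j)
def solveStep (A : List Int) (s : Int × Int × Int × Int × Int) (i : Int) :
    Int × Int × Int × Int × Int :=
  let (ans, start, _end, maxi, maxj) := s
  if PySem.List.pyGetD A i 0 < 0 then (ans, i + 1, _end, maxi, maxj)
  else
    let e := i + 1
    if ans < e - start then (e - start, start, e, start, e)
    else (ans, start, e, maxi, maxj)

def solve (A : List Int) : List Int :=
  let n : Int := A.length
  let st := (PySem.List.pyRange 0 n 1).foldl (solveStep A) (0, 0, 0, -1, -1)
  PySem.List.slice A (some st.2.2.2.1) (some st.2.2.2.2)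

-- ===== PORT B =====
-- phase 1 of Source B: collect the maximal runs of consecutive non-negative elements
def collectRuns (xs : List Int) (cur : List Int) : List (List Int) :=
  match xs with
  | [] => if cur.isEmpty then [] else [cur]
  | x :: t =>
    if 0 ≤ x then collectRuns t (cur ++ [x])
    else if cur.isEmpty then collectRuns t [] else cur :: collectRuns t []

-- phase 2 of Source B: keep the first longest run
def pickLonger (b s : List Int) : List Int := if b.length < s.length then s else b

def solve_alt (A : List Int) : List Int := (collectRuns A []).foldl pickLonger []

-- ===== PRECONDITION & SPEC =====
def Spec_solve (A : List Int) (out : List Int) : Prop := out = solve_alt A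
instance (A : List Int) (out : List Int) : Decidable (Spec_solve A out) := by unfold Spec_solve; infer_instance

-- ===== CLAIM (what is proved, stated in full; the proofs are below) =====
def Claim_equal_solve : Prop := ∀ (A : List Int), Dom_solve A → Spec_solve A (solve A)

-- ===== LEMMAS AND PROOFS =====

lemma pick_nil (b : List Int) : pickLonger b [] = b := by
  simp [pickLonger]

lemma main (A : List Int) : ∀ (rest : List Int) (k : Nat)
    (ans start e maxi maxj : Int) (b : List Int),
    A.drop k = rest → k ≤ A.length →
    0 ≤ start → start.toNat ≤ k →
    (PySem.List.slice A (some maxi) (some maxj)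
       = pickLonger b ((A.drop start.toNat).take (k - start.toNat))) →
    (ans = ((pickLonger b ((A.drop start.toNat).take (k - start.toNat))).length : Int)) →
    (PySem.List.slice A
        (some (((PySem.List.pyRange (k : Int) (A.length : Int) 1).foldl (solveStep A)
            (ans, start, e, maxi, maxj)).2.2.2.1))
        (some (((PySem.List.pyRange (k : Int) (A.length : Int) 1).foldl (solveStep A)
            (ans, start, e, maxi, maxj)).2.2.2.2))
      = (collectRuns rest ((A.drop start.toNat).take (k - start.toNat))).foldl pickLonger b) := by
  intro rest
  induction rest with
  | nil =>
    intro k ans start e maxi maxj b hdrop hk hs0 hsk hbest hans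
    have hlen : A.length ≤ k := List.drop_eq_nil_iff.mp hdrop
    rw [PySem.List.pyRange_one_eq_nil (by exact_mod_cast hlen)]
    simp only [List.foldl_nil]
    rw [hbest]
    by_cases hc : (A.drop start.toNat).take (k - start.toNat) = []
    · simp [collectRuns, hc, pick_nil]
    · simp [collectRuns, List.isEmpty_iff, hc]
  | cons x rest' ih =>
    intro k ans start e maxi maxj b hdrop hk hs0 hsk hbest hans
    have hklt : k < A.length := by
      by_contra h
      rw [List.drop_eq_nil_of_le (by omega)] at hdrop
      simp at hdrop
    have hx? : A[k]? = some x := by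
      rw [← Nat.add_zero k, ← List.getElem?_drop, hdrop]
      rfl
    have hdrop' : A.drop (k + 1) = rest' := by
      have h := congrArg List.tail hdrop
      simpa [List.tail_drop] using h
    have hget : PySem.List.pyGetD A (k : Int) 0 = x := by
      rw [PySem.List.pyGetD_natCast]
      simp [List.getD_eq_getElem?_getD, hx?]
    rw [PySem.List.pyRange_one_cons (by exact_mod_cast hklt)]
    simp only [List.foldl_cons]
    set s := start.toNat with hsdef
    have hstartcast : start = (s : Int) := by omega
    have hcurlen : ((A.drop s).take (k - s)).length = k - s := by
      simp [List.length_take, List.length_drop]; omega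
    have hcast : ((k : Int) + 1) = ((k + 1 : Nat) : Int) := by push_cast; ring
    by_cases hneg : x < 0
    · -- negative element: close the current run, start = k + 1
      have hstep : solveStep A (ans, start, e, maxi, maxj) (k : Int)
          = (ans, (k : Int) + 1, e, maxi, maxj) := by
        simp [solveStep, hget, hneg]
      rw [hstep, hcast]
      have hcur1 : (A.drop (((k + 1 : Nat) : Int)).toNat).take
          ((k + 1) - (((k + 1 : Nat) : Int)).toNat) = [] := by simp
      have hih := ih (k + 1) ans ((k + 1 : Nat) : Int) e maxi maxj
        (pickLonger b ((A.drop s).take (k - s)))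
        hdrop' (by omega) (by exact_mod_cast Nat.zero_le _) (by simp)
        (by rw [hcur1, pick_nil]; exact hbest)
        (by rw [hcur1, pick_nil]; exact hans)
      rw [hcur1] at hih
      rw [hih]
      by_cases hc : (A.drop s).take (k - s) = []
      · simp [collectRuns, hc, not_le.mpr hneg, pick_nil]
      · simp [collectRuns, List.isEmpty_iff, hc, not_le.mpr hneg, List.foldl_cons]
    · -- non-negative element: extend the current run
      push_neg at hneg
      have hcur' : (A.drop s).take (k + 1 - s) = (A.drop s).take (k - s) ++ [x] := by
        have h1 : k + 1 - s = (k - s) + 1 := by omega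
        rw [h1, List.take_succ]
        congr 1
        rw [List.getElem?_drop]
        have h2 : s + (k - s) = k := by omega
        rw [h2, hx?]
        rfl
      have hlenb : ans = max (b.length : Int) ((k : Int) - start) := by
        rw [hans, pickLonger]
        split_ifs with h
        · rw [hcurlen]; omega
        · rw [hcurlen] at h; omega
      by_cases hlt : ans < ((k : Int) + 1) - start
      · -- the extended run becomes the new best window
        have hstep : solveStep A (ans, start, e, maxi, maxj) (k : Int)
            = (((k : Int) + 1) - start, start, (k : Int) + 1, start, (k : Int) + 1) := by
          simp [solveStep, hget, not_lt.mpr hneg, hlt]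
        rw [hstep]
        have hble : (b.length : Int) ≤ (k : Int) - start := by omega
        have hpick' : pickLonger b ((A.drop s).take (k + 1 - s))
            = (A.drop s).take (k + 1 - s) := by
          rw [pickLonger, if_pos]
          rw [hcur', List.length_append, hcurlen]
          simp only [List.length_singleton]
          omega
        have hslice : PySem.List.slice A (some start) (some ((k : Int) + 1))
            = (A.drop s).take (k + 1 - s) := by
          rw [hstartcast, hcast, PySem.List.slice_natCast]
        have hih := ih (k + 1) (((k : Int) + 1) - start) start ((k : Int) + 1)
          start ((k : Int) + 1) b hdrop' (by omega) hs0 (by omega)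
          (by rw [hslice, hpick'])
          (by rw [hpick', hcur', List.length_append, hcurlen]
              simp only [List.length_singleton]
              push_cast; omega)
        push_cast at hih
        rw [hih]
        rw [← hsdef, hcur']; simp [collectRuns, hneg]
      · -- the old best window survives
        have hstep : solveStep A (ans, start, e, maxi, maxj) (k : Int)
            = (ans, start, (k : Int) + 1, maxi, maxj) := by
          simp [solveStep, hget, not_lt.mpr hneg, hlt]
        rw [hstep]
        have hbgt : ((k : Int) - start) < (b.length : Int) := by omega
        have hpickold : pickLonger b ((A.drop s).take (k - s)) = b := by
          rw [pickLonger, if_neg]; rw [hcurlen]; omega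
        have hpick' : pickLonger b ((A.drop s).take (k + 1 - s)) = b := by
          rw [pickLonger, if_neg]
          rw [hcur', List.length_append, hcurlen]
          simp only [List.length_singleton]
          omega
        have hih := ih (k + 1) ans start ((k : Int) + 1) maxi maxj b
          hdrop' (by omega) hs0 (by omega)
          (by rw [hpick']; rw [hpickold] at hbest; exact hbest)
          (by rw [hpick']; rw [hpickold] at hans; exact hans)
        push_cast at hih
        rw [hih]
        rw [← hsdef, hcur']; simp [collectRuns, hneg]

lemma slice_neg_one : ∀ (A : List Int),
    PySem.List.slice A (some (-1)) (some (-1)) = [] := by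
  intro A
  apply List.eq_nil_of_length_eq_zero
  rw [PySem.List.length_slice]; omega

-- ===== VERDICT (by name: the statement is the Claim_ definition above) =====
theorem solve_spec : Claim_equal_solve := by
  intro A _
  show solve A = solve_alt A
  unfold solve solve_alt
  have h0 : (0 : Int) = ((0 : Nat) : Int) := rfl
  rw [h0]
  have := main A A 0 0 0 0 (-1) (-1) []
    (by simp) (by omega) (by omega) (by omega)
    (by simp [slice_neg_one, pick_nil])
    (by simp [pick_nil])
  simpa using this
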